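-- pv_equiv track=rewrite | github.com/AitomaLab/ugc-engine | core_engine.py | should_use_extend_pipeline
-- ===== SOURCE A (Python) =====
-- def should_use_extend_pipeline(scenes):
--     """
--     Returns True if the scene list begins with 2+ consecutive Veo-type scenes.
--     When True, the Extend pipeline chains them into a single seamless video.
--     """
--     veo_types = {"veo", "physical_product_scene"}
--     leading_veo_count = 0
--     for scene in scenes:
--         if scene.get("type") in veo_types:
--             leading_veo_count += 1
--         else:
--             break
--     return leading_veo_count >= 2
-- ===== SOURCE B (Python) =====
-- def should_use_extend_pipeline(scenes):
--     veo_types = {"veo", "physical_product_scene"}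
--     return (len(scenes) >= 2
--             and scenes[0].get("type") in veo_types
--             and scenes[1].get("type") in veo_types)
-- ===== Notes on version B (the rewrite author's own statement) =====
-- stated objective: simpler
-- what changed: Replaces the count-leading-until-break loop and accumulator with a closed-form guard that checks only the first two scenes, since the loop's result depends on nothing else.
import Mathlib
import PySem

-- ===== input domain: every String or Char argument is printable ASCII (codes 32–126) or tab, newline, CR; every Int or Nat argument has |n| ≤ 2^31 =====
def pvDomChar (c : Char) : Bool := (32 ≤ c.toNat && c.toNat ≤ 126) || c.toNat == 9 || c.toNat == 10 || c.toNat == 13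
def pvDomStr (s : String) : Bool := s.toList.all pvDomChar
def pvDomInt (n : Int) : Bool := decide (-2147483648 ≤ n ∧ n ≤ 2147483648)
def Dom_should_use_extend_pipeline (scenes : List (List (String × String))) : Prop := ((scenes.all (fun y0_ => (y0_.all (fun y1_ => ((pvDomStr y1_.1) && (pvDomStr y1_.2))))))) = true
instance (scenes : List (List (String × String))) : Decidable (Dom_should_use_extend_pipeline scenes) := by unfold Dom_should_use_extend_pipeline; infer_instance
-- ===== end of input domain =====

-- B replaces A's count-leading-until-break loop by a closed-form check of the first two scenes (simpler).

-- ===== PORT A =====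
-- scene.get("type") in veo_types  (None for a missing key is never in the set)
def pvIsVeo (scene : List (String × String)) : Bool :=
  match PySem.Dict.get? (PySem.Dict.mk scene) "type" with
  | some t => t == "veo" || t == "physical_product_scene"
  | none => false

-- the for-loop with break: count leading Veo scenes, stop at the first non-Veo
def pvLeadingVeoCount (scenes : List (List (String × String))) : Nat :=
  match scenes with
  | [] => 0
  | scene :: rest => if pvIsVeo scene then pvLeadingVeoCount rest + 1 else 0

def should_use_extend_pipeline (scenes : List (List (String × String))) : Bool :=
  pvLeadingVeoCount scenes ≥ 2

-- ===== PORT B =====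
def should_use_extend_pipeline_alt (scenes : List (List (String × String))) : Bool :=
  decide (scenes.length ≥ 2) &&
    (match PySem.List.pyGet? scenes 0 with
     | some s => match PySem.Dict.get? (PySem.Dict.mk s) "type" with
       | some t => t == "veo" || t == "physical_product_scene"
       | none => false
     | none => false) &&
    (match PySem.List.pyGet? scenes 1 with
     | some s => match PySem.Dict.get? (PySem.Dict.mk s) "type" with
       | some t => t == "veo" || t == "physical_product_scene"
       | none => false
     | none => false)

-- ===== PRECONDITION & SPEC =====
def Spec_should_use_extend_pipeline (scenes : List (List (String × String))) (out : Bool) : Prop := out = should_use_extend_pipeline_alt scenes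
instance (scenes : List (List (String × String))) (out : Bool) : Decidable (Spec_should_use_extend_pipeline scenes out) := by unfold Spec_should_use_extend_pipeline; infer_instance

-- ===== CLAIM (what is proved, stated in full; the proofs are below) =====
def Claim_equal_should_use_extend_pipeline : Prop := ∀ (scenes : List (List (String × String))), Dom_should_use_extend_pipeline scenes → Spec_should_use_extend_pipeline scenes (should_use_extend_pipeline scenes)

-- ===== LEMMAS AND PROOFS =====
theorem pv_get0 {α : Type} (x : α) (l : List α) : PySem.List.pyGet? (x :: l) 0 = some x := by
  simp [PySem.List.pyGet?, PySem.List.pyIdx?]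

theorem pv_get1 {α : Type} (x y : α) (l : List α) : PySem.List.pyGet? (x :: y :: l) 1 = some y := by
  have : (0:Int) ≤ (l.length : Int) + 1 + 1 := by positivity
  simp [PySem.List.pyGet?, PySem.List.pyIdx?, this]

theorem pv_equal (scenes : List (List (String × String))) :
    should_use_extend_pipeline scenes = should_use_extend_pipeline_alt scenes := by
  match scenes with
  | [] => rfl
  | [s] =>
    simp [should_use_extend_pipeline, should_use_extend_pipeline_alt, pvLeadingVeoCount]
    split <;> simp
  | s0 :: s1 :: rest =>
    simp only [should_use_extend_pipeline, should_use_extend_pipeline_alt, pvLeadingVeoCount,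
      pvIsVeo]
    by_cases h0 : (match PySem.Dict.get? (PySem.Dict.mk s0) "type" with
        | some t => t == "veo" || t == "physical_product_scene"
        | none => false) = true <;>
    by_cases h1 : (match PySem.Dict.get? (PySem.Dict.mk s1) "type" with
        | some t => t == "veo" || t == "physical_product_scene"
        | none => false) = true <;>
    all_goals simp [pv_get0, pv_get1, h0, h1]

-- ===== VERDICT (by name: the statement is the Claim_ definition above) =====
theorem should_use_extend_pipeline_spec : Claim_equal_should_use_extend_pipeline := by
  intro scenes _
  exact pv_equal scenes
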